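-- pv_equiv track=rewrite | github.com/SatyamVyas04/AdventOfCode | 2024/Day 05/solution.py | check_deps
-- ===== SOURCE A (Python) =====
-- def check_deps(graph, task):
--     '''
--     Check if the task is in the correct order based on dependencies
--     '''
--     pages_done = set()
--     pages_needed = set(task)
--     for t in task:
--         for dep in graph[t]:
--             if dep in pages_needed and dep not in pages_done:
--                 return False
--         pages_done.add(t)
--     return True
-- ===== SOURCE B (Python) =====
-- def check_deps(graph, task):
--     '''
--     Check if the task is in the correct order based on dependencies
--     '''
--     # Transposed traversal: instead of scanning the task and growing a done-set,
--     # iterate over the graph's edges once and flag a violation whenever a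
--     # dependency's first occurrence in the task is not strictly before the
--     # dependent page's first occurrence.
--     present = set(task)
--     return not any(
--         dep in present and task.index(dep) >= task.index(t)
--         for t, deps in graph.items()
--         if t in present
--         for dep in deps
--     )
-- ===== Notes on version B (the rewrite author's own statement) =====
-- stated objective: alternative
-- what changed: Transposes the traversal: instead of A's in-order scan of the task growing a pages_done set, B iterates once over the graph's edge lists and flags a violation when a dependency's first occurrence in the task is not strictly before the dependent page's first occurrence.
import Mathlib
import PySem

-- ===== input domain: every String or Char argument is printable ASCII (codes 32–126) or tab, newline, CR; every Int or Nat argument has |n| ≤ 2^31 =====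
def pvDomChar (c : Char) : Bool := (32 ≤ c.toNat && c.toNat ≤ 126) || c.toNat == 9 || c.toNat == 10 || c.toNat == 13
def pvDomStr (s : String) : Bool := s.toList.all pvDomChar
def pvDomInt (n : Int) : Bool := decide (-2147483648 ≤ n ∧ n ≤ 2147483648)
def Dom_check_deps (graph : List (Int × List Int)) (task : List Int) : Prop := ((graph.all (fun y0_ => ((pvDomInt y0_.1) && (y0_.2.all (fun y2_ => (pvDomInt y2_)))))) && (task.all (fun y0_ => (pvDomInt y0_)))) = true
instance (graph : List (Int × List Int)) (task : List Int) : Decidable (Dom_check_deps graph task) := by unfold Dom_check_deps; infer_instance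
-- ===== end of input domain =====

-- B transposes the traversal: it iterates once over the graph's edge lists and compares first
-- occurrences in the task, instead of A's in-order scan of the task growing a done-set
-- (objective: alternative; same result on Pre_).

-- ===== PORT A =====
-- the loop 'for t in task' with the growing pages_done set; 'return False' = the Bool result.
-- graph[t] with a missing key is a Python KeyError: excluded by Pre_; the port returns false there (unreachable under Pre_).
def checkDepsLoopA (graph : List (Int × List Int)) (needed : PySem.Set Int) :
    List Int → PySem.Set Int → Bool
  | [], _ => true
  | t :: rest, done =>
    match PySem.Dict.get? (PySem.Dict.mk graph) t with
    | none => false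
    | some deps =>
      if deps.any (fun dep => PySem.Set.contains needed dep && !PySem.Set.contains done dep) then
        false
      else
        checkDepsLoopA graph needed rest (PySem.Set.add done t)

def check_deps (graph : List (Int × List Int)) (task : List Int) : Bool :=
  checkDepsLoopA graph (PySem.Set.ofList task) task PySem.Set.empty

-- ===== PORT B =====
-- 'task.index(dep) >= task.index(t)' (in the Python both index calls are reached only for members)
def checkDepsIdxGE (task : List Int) (t dep : Int) : Bool :=
  match PySem.List.index? task dep, PySem.List.index? task t with
  | some pd, some pt => decide (pt ≤ pd)
  | _, _ => false

-- 'not any(dep in present and task.index(dep) >= task.index(t)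
--          for t, deps in graph.items() if t in present for dep in deps)'
def check_deps_alt (graph : List (Int × List Int)) (task : List Int) : Bool :=
  let present : PySem.Set Int := PySem.Set.ofList task
  ! ((PySem.Dict.mk graph).items.any (fun p =>
        PySem.Set.contains present p.1 &&
        p.2.any (fun dep => PySem.Set.contains present dep && checkDepsIdxGE task p.1 dep)))

-- ===== PRECONDITION & SPEC =====
-- Pre_ excludes (a) inputs on which A raises KeyError: a task page missing from graph with no
-- 'return False' triggered at or before the first missing page (second disjunct = some page
-- task[i], with all pages up to it present as keys, has a dependency still needed at i); and
-- (b) graph lists with duplicate keys, which encode no Python dict (graph is a dict in A).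
def Pre_check_deps (graph : List (Int × List Int)) (task : List Int) : Prop :=
  (graph.map Prod.fst).Nodup ∧
  ((∀ t ∈ task, (PySem.Dict.mk graph).contains t = true) ∨
   ∃ i < task.length, (∀ u ∈ task.take (i + 1), (PySem.Dict.mk graph).contains u = true) ∧
     ∃ dep ∈ (PySem.Dict.get? (PySem.Dict.mk graph) (task.getD i 0)).getD [],
       dep ∈ task ∧ dep ∉ task.take i)
instance (graph : List (Int × List Int)) (task : List Int) : Decidable (Pre_check_deps graph task) := by unfold Pre_check_deps; infer_instance

def pvWitness_check_deps : (List (Int × List Int)) × List Int :=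
  ([(1, [2]), (2, []), (3, [1])], [1, 2, 3])

def Spec_check_deps (graph : List (Int × List Int)) (task : List Int) (out : Bool) : Prop := out = check_deps_alt graph task
instance (graph : List (Int × List Int)) (task : List Int) (out : Bool) : Decidable (Spec_check_deps graph task out) := by unfold Spec_check_deps; infer_instance

-- ===== CLAIM (what is proved, stated in full; the proofs are below) =====
def Claim_equal_check_deps : Prop := ∀ (graph : List (Int × List Int)) (task : List Int), Dom_check_deps graph task → Pre_check_deps graph task → Spec_check_deps graph task (check_deps graph task)

-- ===== LEMMAS AND PROOFS =====

-- the common "violation" proposition both programs decide: some page t of the task has a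
-- dependency dep that also occurs in the task, no earlier than t's first occurrence
def checkDepsViol (graph : List (Int × List Int)) (task : List Int) : Prop :=
  ∃ t deps, PySem.Dict.get? (PySem.Dict.mk graph) t = some deps ∧ t ∈ task ∧
    ∃ dep ∈ deps, dep ∈ task ∧ task.idxOf t ≤ task.idxOf dep

theorem checkDeps_index?_of_mem (task : List Int) (x : Int) (h : x ∈ task) :
    PySem.List.index? task x = some (task.idxOf x) := by
  rw [PySem.List.index?_eq_idxOf?]
  induction task with
  | nil => simp at h
  | cons a t ih =>
    by_cases hax : a = x
    · subst hax; simp [List.idxOf?_cons]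
    · have hx : x ∈ t := by simpa [Ne.symm hax] using h
      simp [List.idxOf?_cons, hax, ih hx, beq_iff_eq]

-- "dep is not before (the first occurrence of) t": split form vs idxOf form
theorem checkDeps_split_iff_idx (task : List Int) (t dep : Int) (hdt : dep ∈ task) :
    (∃ p2 r2, task = p2 ++ t :: r2 ∧ dep ∉ p2) ↔ (t ∈ task ∧ task.idxOf t ≤ task.idxOf dep) := by
  constructor
  · rintro ⟨p2, r2, rfl, hnp⟩
    refine ⟨by simp, ?_⟩
    rw [List.idxOf_append, List.idxOf_append]
    by_cases htp : t ∈ p2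
    · rw [if_pos htp, if_neg hnp]
      have := List.idxOf_lt_length_of_mem htp
      omega
    · rw [if_neg htp, if_neg hnp]
      simp [List.idxOf_cons_self]
  · rintro ⟨htm, hle⟩
    have hk := List.idxOf_lt_length_of_mem htm
    refine ⟨task.take (task.idxOf t), task.drop (task.idxOf t + 1), ?_, ?_⟩
    · conv_lhs => rw [← List.take_append_drop (task.idxOf t) task]
      rw [List.drop_eq_getElem_cons hk, List.getElem_idxOf hk]
    · intro hmem
      have hlt : task.idxOf dep < task.idxOf t := by
        have h1 : task.idxOf dep = List.idxOf dep (task.take (task.idxOf t) ++ task.drop (task.idxOf t)) := by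
          rw [List.take_append_drop]
        rw [h1, List.idxOf_append, if_pos hmem]
        calc List.idxOf dep (task.take (task.idxOf t)) < (task.take (task.idxOf t)).length :=
              List.idxOf_lt_length_of_mem hmem
          _ ≤ task.idxOf t := by simp
      omega

-- A's loop returns false as soon as some page of 'rest' has a still-needed dependency
-- (no key-containment hypothesis: a missing earlier key also yields false in the port)
theorem checkDepsLoopA_false_of_viol (graph : List (Int × List Int)) (task : List Int) :
    ∀ (rest pre : List Int),
    (∃ p2 t r2, rest = p2 ++ t :: r2 ∧
        ∃ deps, PySem.Dict.get? (PySem.Dict.mk graph) t = some deps ∧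
          ∃ dep ∈ deps, dep ∈ task ∧ dep ∉ pre ++ p2) →
    checkDepsLoopA graph (PySem.Set.ofList task) rest (PySem.Set.ofList pre) = false := by
  intro rest
  induction rest with
  | nil =>
    rintro pre ⟨p2, t, r2, hsplit, -⟩
    exact absurd hsplit (by simp)
  | cons u rest ih =>
    rintro pre ⟨p2, t, r2, hsplit, deps, hg, dep, hdm, hdt, hdnp⟩
    show checkDepsLoopA graph (PySem.Set.ofList task) (u :: rest) (PySem.Set.ofList pre) = false
    unfold checkDepsLoopA
    cases hgu : PySem.Dict.get? (PySem.Dict.mk graph) u with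
    | none => rfl
    | some depsU =>
      simp only
      by_cases hany : depsU.any (fun d => PySem.Set.contains (PySem.Set.ofList task) d && !PySem.Set.contains (PySem.Set.ofList pre) d) = true
      · rw [if_pos hany]
      · rw [if_neg hany]
        rw [PySem.Set.add_eq_ite]
        have hadd : (if u ∈ PySem.Set.ofList pre then PySem.Set.ofList pre else PySem.Set.ofList pre ++ [u]) = PySem.Set.ofList (pre ++ [u]) := by
          rw [PySem.Set.ofList_append_singleton, PySem.Set.add_eq_ite]
        rw [hadd]
        cases p2 with
        | nil =>
          simp only [List.nil_append] at hsplit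
          injection hsplit with h1 h2
          subst h1; subst h2
          rw [hg] at hgu
          injection hgu with h3
          subst h3
          exfalso
          apply hany
          refine List.any_eq_true.mpr ⟨dep, hdm, ?_⟩
          rw [Bool.and_eq_true, Bool.not_eq_true', ← Bool.not_eq_true]
          refine ⟨(PySem.Set.contains_iff _ _).mpr ((PySem.Set.mem_ofList _ _).mpr hdt), ?_⟩
          intro hc
          exact hdnp (by simpa using (PySem.Set.mem_ofList _ _).mp ((PySem.Set.contains_iff _ _).mp hc))
        | cons q p2' =>
          simp only [List.cons_append] at hsplit
          injection hsplit with h1 h2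
          subst h1
          apply ih
          refine ⟨p2', t, r2, h2, deps, hg, dep, hdm, hdt, ?_⟩
          intro hmem
          apply hdnp
          simp only [List.mem_append, List.mem_cons] at hmem ⊢
          tauto

theorem checkDepsLoopA_viol_of_false (graph : List (Int × List Int)) (task : List Int) :
    ∀ (rest pre : List Int),
    (∀ t ∈ rest, (PySem.Dict.mk graph).contains t = true) →
    checkDepsLoopA graph (PySem.Set.ofList task) rest (PySem.Set.ofList pre) = false →
    ∃ p2 t r2, rest = p2 ++ t :: r2 ∧
        ∃ deps, PySem.Dict.get? (PySem.Dict.mk graph) t = some deps ∧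
          ∃ dep ∈ deps, dep ∈ task ∧ dep ∉ pre ++ p2 := by
  intro rest
  induction rest with
  | nil =>
    intro pre _ hfalse
    simp [checkDepsLoopA] at hfalse
  | cons t rest ih =>
    intro pre hk hfalse
    have hct : (PySem.Dict.mk graph).contains t = true := hk t (by simp)
    rw [PySem.Dict.contains_eq_isSome_get?] at hct
    cases hg : PySem.Dict.get? (PySem.Dict.mk graph) t with
    | none => rw [hg] at hct; simp at hct
    | some deps =>
      unfold checkDepsLoopA at hfalse
      rw [hg] at hfalse
      simp only at hfalse
      by_cases hany : deps.any (fun dep => PySem.Set.contains (PySem.Set.ofList task) dep && !PySem.Set.contains (PySem.Set.ofList pre) dep) = true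
      · obtain ⟨dep, hdm, hdc⟩ := List.any_eq_true.mp hany
        rw [Bool.and_eq_true, Bool.not_eq_true', ← Bool.not_eq_true] at hdc
        refine ⟨[], t, rest, rfl, deps, hg, dep, hdm, ?_, ?_⟩
        · exact (PySem.Set.mem_ofList _ _).mp ((PySem.Set.contains_iff _ _).mp hdc.1)
        · simp only [List.append_nil]
          intro hmem
          exact hdc.2 ((PySem.Set.contains_iff _ _).mpr ((PySem.Set.mem_ofList _ _).mpr hmem))
      · rw [if_neg hany] at hfalse
        rw [PySem.Set.add_eq_ite] at hfalse
        have hadd : (if t ∈ PySem.Set.ofList pre then PySem.Set.ofList pre else PySem.Set.ofList pre ++ [t]) = PySem.Set.ofList (pre ++ [t]) := by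
          rw [PySem.Set.ofList_append_singleton, PySem.Set.add_eq_ite]
        rw [hadd] at hfalse
        obtain ⟨p2, u, r2, hsplit, deps', hg', dep, hdm, hdt, hdnp⟩ :=
          ih (pre ++ [t]) (fun v hv => hk v (by simp [hv])) hfalse
        refine ⟨t :: p2, u, r2, by simp [hsplit], deps', hg', dep, hdm, hdt, ?_⟩
        intro hmem
        apply hdnp
        simp only [List.mem_append, List.mem_cons] at hmem ⊢
        tauto

theorem checkDepsA_false_iff (graph : List (Int × List Int)) (task : List Int)
    (hpre : ∀ t ∈ task, (PySem.Dict.mk graph).contains t = true) :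
    check_deps graph task = false ↔ checkDepsViol graph task := by
  unfold check_deps
  rw [show (PySem.Set.empty : PySem.Set Int) = PySem.Set.ofList [] from rfl]
  unfold checkDepsViol
  constructor
  · intro h
    obtain ⟨p2, t, r2, hsplit, deps, hg, dep, hdm, hdt, hnp⟩ :=
      checkDepsLoopA_viol_of_false graph task task [] hpre h
    have hti := (checkDeps_split_iff_idx task t dep hdt).mp ⟨p2, r2, hsplit, by simpa using hnp⟩
    exact ⟨t, deps, hg, hti.1, dep, hdm, hdt, hti.2⟩
  · rintro ⟨t, deps, hg, htm, dep, hdm, hdt, hle⟩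
    obtain ⟨p2, r2, hsplit, hnp⟩ := (checkDeps_split_iff_idx task t dep hdt).mpr ⟨htm, hle⟩
    exact checkDepsLoopA_false_of_viol graph task task []
      ⟨p2, t, r2, hsplit, deps, hg, dep, hdm, hdt, by simpa using hnp⟩

theorem checkDepsB_false_iff (graph : List (Int × List Int)) (task : List Int)
    (hnd : (graph.map Prod.fst).Nodup) :
    check_deps_alt graph task = false ↔ checkDepsViol graph task := by
  have hndk : (PySem.Dict.mk graph).keys.Nodup := by
    simpa [PySem.Dict.keys_mk] using hnd
  unfold check_deps_alt checkDepsViol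
  simp only [Bool.not_eq_false', List.any_eq_true, Bool.and_eq_true]
  constructor
  · rintro ⟨⟨t, deps⟩, hmem, hct, dep, hdm, hcd, hge⟩
    have htm : t ∈ task := (PySem.Set.mem_ofList _ _).mp ((PySem.Set.contains_iff _ _).mp hct)
    have hdt : dep ∈ task := (PySem.Set.mem_ofList _ _).mp ((PySem.Set.contains_iff _ _).mp hcd)
    refine ⟨t, deps, (PySem.Dict.get?_eq_some_iff_mem_items _ _ _ hndk).mpr hmem, htm, dep, hdm, hdt, ?_⟩
    unfold checkDepsIdxGE at hge
    rw [checkDeps_index?_of_mem task dep hdt, checkDeps_index?_of_mem task t htm] at hge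
    simpa using hge
  · rintro ⟨t, deps, hg, htm, dep, hdm, hdt, hle⟩
    refine ⟨(t, deps), (PySem.Dict.get?_eq_some_iff_mem_items _ _ _ hndk).mp hg,
      (PySem.Set.contains_iff _ _).mpr ((PySem.Set.mem_ofList _ _).mpr htm), dep, hdm,
      (PySem.Set.contains_iff _ _).mpr ((PySem.Set.mem_ofList _ _).mpr hdt), ?_⟩
    unfold checkDepsIdxGE
    rw [checkDeps_index?_of_mem task dep hdt, checkDeps_index?_of_mem task t htm]
    simpa using hle

-- ===== VERDICT (by name: the statement is the Claim_ definition above) =====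
theorem check_deps_spec : Claim_equal_check_deps := by
  rintro graph task _ ⟨hnd, hall | ⟨i, hi, hcont, dep, hdm, hdt, hnp⟩⟩
  · unfold Spec_check_deps
    have hA := checkDepsA_false_iff graph task hall
    have hB := checkDepsB_false_iff graph task hnd
    cases hA' : check_deps graph task <;> cases hB' : check_deps_alt graph task <;> simp_all
  · -- A returns False at (or before) page i although a later page may be missing from graph
    have htg : task.getD i 0 = task[i] := List.getD_eq_getElem task 0 hi
    set t := task.getD i 0 with ht
    have hsplit : task = task.take i ++ t :: task.drop (i + 1) := by
      conv_lhs => rw [← List.take_append_drop i task]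
      rw [List.drop_eq_getElem_cons hi, htg]
    have htm : t ∈ task := by rw [htg]; exact List.getElem_mem hi
    have hct : (PySem.Dict.mk graph).contains t = true := by
      apply hcont
      rw [htg]
      have h1 : i < (task.take (i + 1)).length := by simp; omega
      have h2 : (task.take (i + 1))[i] = task[i] := List.getElem_take
      rw [← h2]
      exact List.getElem_mem h1
    rw [PySem.Dict.contains_eq_isSome_get?] at hct
    obtain ⟨deps, hg⟩ := Option.isSome_iff_exists.mp hct
    rw [hg] at hdm
    simp only [Option.getD_some] at hdm
    have hviol : checkDepsViol graph task := by
      have hti := (checkDeps_split_iff_idx task t dep hdt).mp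
        ⟨task.take i, task.drop (i + 1), hsplit, hnp⟩
      exact ⟨t, deps, hg, htm, dep, hdm, hdt, hti.2⟩
    have hA : check_deps graph task = false := by
      unfold check_deps
      rw [show (PySem.Set.empty : PySem.Set Int) = PySem.Set.ofList [] from rfl]
      exact checkDepsLoopA_false_of_viol graph task task []
        ⟨task.take i, t, task.drop (i + 1), hsplit, deps, hg, dep, hdm, hdt, by simpa using hnp⟩
    have hB : check_deps_alt graph task = false := (checkDepsB_false_iff graph task hnd).mpr hviol
    unfold Spec_check_deps
    rw [hA, hB]
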